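-- pv_equiv track=rewrite | github.com/m7mdony/GPC-FTW | 2011/combination/main.py | calculate
-- ===== SOURCE A (Python) =====
-- def  calculate(target,coins,list,string):
--
--     if target==0:
--
--         list.append(string)
--         return 1
--     elif target<0 :
--         return 0
--
--     total=0
--     for coin in coins:
--         string_copy=string
--
--         string_copy+=str(coin)
--         target_copy=target
--         target_copy-=coin
--
--
--
--         total+=calculate(target_copy,coins,list,string_copy)
--
--
--     return total
-- ===== SOURCE B (Python) =====
-- def calculate(target, coins, list, string):
--     # Bottom-up DP over the number of ordered coin sequences (compositions)
--     # summing to each value 0..target.  Return-value equivalent to A; does not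
--     # reproduce A's side effect of appending the enumerated strings to `list`.
--     if target < 0:
--         return 0
--     dp = [1] + [0] * target
--     for t in range(1, target + 1):
--         dp[t] = sum(dp[t - c] for c in coins if 0 < c <= t)
--     return dp[target]
-- ===== Notes on version B (the rewrite author's own statement) =====
-- stated objective: faster
-- what changed: Replaces the exponential recursive DFS over all coin sequences with a bottom-up dynamic-programming table dp[0..target] using the composition recurrence dp[t] = sum(dp[t-c]); return-value equivalent, but B does not append the enumerated strings to `list`.
import Mathlib
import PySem

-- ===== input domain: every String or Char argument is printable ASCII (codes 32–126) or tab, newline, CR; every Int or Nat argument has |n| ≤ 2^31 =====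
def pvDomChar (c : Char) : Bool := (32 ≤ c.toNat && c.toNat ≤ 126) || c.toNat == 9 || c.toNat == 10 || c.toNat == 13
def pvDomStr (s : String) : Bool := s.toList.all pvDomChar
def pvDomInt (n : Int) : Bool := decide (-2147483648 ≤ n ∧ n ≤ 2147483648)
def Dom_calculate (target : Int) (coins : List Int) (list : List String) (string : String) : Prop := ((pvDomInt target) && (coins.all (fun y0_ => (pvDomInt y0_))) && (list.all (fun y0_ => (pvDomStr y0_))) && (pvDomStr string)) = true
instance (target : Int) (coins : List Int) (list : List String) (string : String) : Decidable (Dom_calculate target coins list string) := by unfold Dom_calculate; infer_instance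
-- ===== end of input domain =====

-- B replaces A's exponential recursive DFS by a bottom-up DP table over 0..target
-- (asymptotically faster); equivalence is about the RETURN value only — A also
-- appends the enumerated strings to `list`, a side effect B does not perform.


-- ===== PORT A =====
-- Literal port of A's recursion; the fuel parameter (target.toNat + 1) only makes
-- the recursion total in Lean — inside Pre_ (coins ≥ 1) it is never exhausted.
def calcA (coins : List Int) : Nat → Int → String → Int
  | 0, _, _ => 0
  | fuel + 1, target, string =>
    if target = 0 then 1
    else if target < 0 then 0
    else coins.foldl (fun total coin =>
      total + calcA coins fuel (target - coin) (string ++ PySem.Int.toStr coin)) 0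

def calculate (target : Int) (coins : List Int) (list : List String) (string : String) : Int :=
  calcA coins (target.toNat + 1) target string

-- ===== PORT B =====
-- sum(dp[t - c] for c in coins if 0 < c <= t)
def dpSum (coins : List Int) (dp : List Int) (t : Int) : Int :=
  coins.foldl (fun a c => a + if 0 < c ∧ c ≤ t then dp.getD (t - c).toNat 0 else 0) 0

def calculate_alt (target : Int) (coins : List Int) (list : List String) (string : String) : Int :=
  if target < 0 then 0
  else
    let dp0 : List Int := 1 :: List.replicate target.toNat 0
    let dp := (PySem.List.pyRange 1 (target + 1) 1).foldl
      (fun dp t => dp.set t.toNat (dpSum coins dp t)) dp0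
    dp.getD target.toNat 0

-- ===== PRECONDITION & SPEC =====
-- Pre_ excludes exactly the inputs where A never returns: with target > 0 and some
-- coin ≤ 0 the recursion never reaches the base case and Python A raises RecursionError.
def Pre_calculate (target : Int) (coins : List Int) (list : List String) (string : String) : Prop :=
  target ≤ 0 ∨ ∀ c ∈ coins, 1 ≤ c
instance (target : Int) (coins : List Int) (list : List String) (string : String) : Decidable (Pre_calculate target coins list string) := by unfold Pre_calculate; infer_instance

def pvWitness_calculate : Int × List Int × List String × String := (4, [1, 2], [], "")

def Spec_calculate (target : Int) (coins : List Int) (list : List String) (string : String) (out : Int) : Prop := out = calculate_alt target coins list string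
instance (target : Int) (coins : List Int) (list : List String) (string : String) (out : Int) : Decidable (Spec_calculate target coins list string out) := by unfold Spec_calculate; infer_instance

-- ===== CLAIM (what is proved, stated in full; the proofs are below) =====
def Claim_equal_calculate : Prop := ∀ (target : Int) (coins : List Int) (list : List String) (string : String), Dom_calculate target coins list string → Pre_calculate target coins list string → Spec_calculate target coins list string (calculate target coins list string)

-- ===== LEMMAS AND PROOFS =====

lemma calcA_of_neg (coins : List Int) (f : Nat) (t : Int) (s : String)
    (hf : 0 < f) (ht : t < 0) : calcA coins f t s = 0 := by
  cases f with
  | zero => omega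
  | succ a =>
    simp only [calcA]
    rw [if_neg (by omega), if_pos ht]

-- the result depends neither on the string accumulator nor on the (sufficient) fuel
lemma calcA_fuel_str (coins : List Int) (hpos : ∀ c ∈ coins, 1 ≤ c) :
    ∀ (f₁ f₂ : Nat) (t : Int) (s₁ s₂ : String), t.toNat < f₁ → t.toNat < f₂ →
      calcA coins f₁ t s₁ = calcA coins f₂ t s₂ := by
  intro f₁
  induction f₁ with
  | zero => intro f₂ t s₁ s₂ h1 _; omega
  | succ a ih =>
    intro f₂ t s₁ s₂ h1 h2
    cases f₂ with
    | zero => omega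
    | succ b =>
      by_cases h0 : t = 0
      · simp [calcA, h0]
      by_cases hneg : t < 0
      · simp [calcA, h0, hneg]
      · simp only [calcA, h0, hneg, if_false]
        refine PySem.List.foldl_congr_mem coins _ _ _ ?_
        intro acc c hc
        have hc1 := hpos c hc
        congr 1
        exact ih b (t - c) _ _ (by omega) (by omega)

-- reference count as a function of a natural number
def cnt (coins : List Int) (n : Nat) : Int := calcA coins (n + 1) (n : Int) ""

lemma cnt_zero (coins : List Int) : cnt coins 0 = 1 := by
  simp [cnt, calcA]

-- the composition recurrence satisfied by A's recursion
lemma cnt_rec (coins : List Int) (hpos : ∀ c ∈ coins, 1 ≤ c) (n : Nat) (hn : 0 < n) :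
    cnt coins n =
      coins.foldl (fun a c =>
        a + if 0 < c ∧ c ≤ (n : Int) then cnt coins ((n : Int) - c).toNat else 0) 0 := by
  have hne : ¬ ((n : Int) = 0) := by omega
  have hlt : ¬ ((n : Int) < 0) := by omega
  show calcA coins (((n:Int)).toNat + 1) (n : Int) "" = _
  rw [show ((n : Int)).toNat + 1 = n + 1 by omega]
  simp only [calcA, hne, hlt, if_false]
  refine PySem.List.foldl_congr_mem coins _ _ _ ?_
  intro acc c hc
  have hc1 := hpos c hc
  congr 1
  by_cases hle : c ≤ (n : Int)
  · rw [if_pos ⟨by omega, hle⟩]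
    unfold cnt
    rw [show ((((n : Int) - c).toNat : Int)) = (n : Int) - c by omega]
    exact calcA_fuel_str coins hpos n (((n : Int) - c).toNat + 1) ((n:Int) - c) _ _ (by omega) (by omega)
  · rw [if_neg (by tauto)]
    exact calcA_of_neg coins n ((n:Int) - c) _ (by omega) (by omega)

-- DP-loop invariant: after processing 1..m the table holds cnt on 0..m
lemma dp_inv (coins : List Int) (hpos : ∀ c ∈ coins, 1 ≤ c) (T : Nat) :
    ∀ m : Nat, m ≤ T →
      ((PySem.List.pyRange 1 ((m : Int) + 1) 1).foldl
          (fun dp t => dp.set t.toNat (dpSum coins dp t))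
          (1 :: List.replicate T 0)).length = T + 1 ∧
      ∀ i : Nat, i ≤ m →
        ((PySem.List.pyRange 1 ((m : Int) + 1) 1).foldl
            (fun dp t => dp.set t.toNat (dpSum coins dp t))
            (1 :: List.replicate T 0)).getD i 0 = cnt coins i := by
  intro m
  induction m with
  | zero =>
    intro _
    rw [PySem.List.pyRange_one_eq_nil (by omega)]
    constructor
    · simp
    · intro i hi
      interval_cases i
      simpa using (cnt_zero coins).symm
  | succ m ih =>
    intro hm
    obtain ⟨hlen, hval⟩ := ih (by omega)
    have hsplit : PySem.List.pyRange 1 (((m+1 : Nat) : Int) + 1) 1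
        = PySem.List.pyRange 1 ((m : Int) + 1) 1 ++ [((m : Int) + 1)] := by
      rw [show (((m+1 : Nat) : Int) + 1) = ((m : Int) + 1) + 1 by push_cast; ring]
      exact PySem.List.pyRange_one_succ_right (by omega)
    rw [hsplit, List.foldl_append]
    set dpm := (PySem.List.pyRange 1 ((m : Int) + 1) 1).foldl
        (fun dp t => dp.set t.toNat (dpSum coins dp t)) (1 :: List.replicate T 0) with hdpm
    simp only [List.foldl_cons, List.foldl_nil]
    have htn : ((m : Int) + 1).toNat = m + 1 := by omega
    constructor
    · simp [hlen]
    · intro i hi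
      have hstep : dpSum coins dpm ((m : Int) + 1) = cnt coins (m + 1) := by
        rw [cnt_rec coins hpos (m+1) (by omega)]
        unfold dpSum
        refine PySem.List.foldl_congr_mem coins _ _ _ ?_
        intro acc c hc
        have hc1 := hpos c hc
        have hcast : (((m+1 : Nat) : Int)) = (m : Int) + 1 := by push_cast; ring
        rw [hcast]
        congr 1
        by_cases hcond : 0 < c ∧ c ≤ (m : Int) + 1
        · rw [if_pos hcond, if_pos hcond]
          have hidx : ((m : Int) + 1 - c).toNat ≤ m := by omega
          exact hval _ hidx
        · rw [if_neg hcond, if_neg hcond]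
      rcases Nat.lt_or_ge i (m+1) with hlt | hge
      · -- untouched index
        have : (dpm.set (((m : Int) + 1).toNat) (dpSum coins dpm ((m : Int) + 1))).getD i 0
            = dpm.getD i 0 := by
          rw [htn]
          rw [List.getD_eq_getElem?_getD, List.getD_eq_getElem?_getD, List.getElem?_set,
            if_neg (by omega : ¬ (m + 1 = i))]
        rw [this]
        exact hval i (by omega)
      · have hieq : i = m + 1 := by omega
        subst hieq
        rw [htn]
        have hinb : m + 1 < dpm.length := by omega
        rw [List.getD_eq_getElem?_getD, List.getElem?_set, if_pos rfl, if_pos hinb]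
        simpa using hstep

-- ===== VERDICT (by name: the statement is the Claim_ definition above) =====
theorem calculate_spec : Claim_equal_calculate := by
  intro target coins list string _ hpre
  show calculate target coins list string = calculate_alt target coins list string
  by_cases hneg : target < 0
  · unfold calculate calculate_alt
    rw [if_pos hneg]
    exact calcA_of_neg coins _ target string (by omega) hneg
  by_cases h0 : target = 0
  · subst h0
    unfold calculate calculate_alt
    simp [calcA, PySem.List.pyRange_one_eq_nil]
  · -- target > 0, so Pre_ gives positive coins
    have hpos : ∀ c ∈ coins, 1 ≤ c := by
      rcases hpre with h | h
      · omega
      · exact h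
    have hT : ((target.toNat : Int)) = target := by omega
    obtain ⟨_, hval⟩ := dp_inv coins hpos target.toNat target.toNat le_rfl
    unfold calculate calculate_alt
    rw [if_neg hneg]
    have := hval target.toNat le_rfl
    rw [hT] at this
    rw [this]
    unfold cnt
    rw [hT]
    exact calcA_fuel_str coins hpos _ _ target string "" (by omega) (by omega)
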